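-- pv_equiv track=rewrite | github.com/visaplan/visaplan.tools | src/visaplan/tools/debug.py | gen_suffix
-- ===== SOURCE A (Python) =====
-- def gen_suffix(seq, ch=',', lastch=')'):
--     """
--     Hilfsfunktion für asciibox_lines:
--     Füge jedem Element der übergebenen Sequenz <seq> das Suffix <ch>
--     hinzu - bis auf das letzte, das <lastch> bekommt.
--
--     >>> list(gen_suffix(['eins', 'zwei']))
--     ['eins,', 'zwei)']
--     """
--     prev = None
--     first = True
--     for item in seq:
--         if first:
--             first = False
--         else:
--             yield prev + ch
--         prev = item
--     if not first:
--         yield item + lastch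
-- ===== SOURCE B (Python) =====
-- def gen_suffix(seq, ch=',', lastch=')'):
--     # Two staged passes over a materialized list: no prev buffer, no flag.
--     lst = list(seq)
--     for s in lst[:-1]:
--         yield s + ch
--     for s in lst[-1:]:
--         yield s + lastch
-- ===== Notes on version B (the rewrite author's own statement) =====
-- stated objective: simpler
-- what changed: Materializes the sequence once and emits two staged slice passes (lst[:-1] with ch, lst[-1:] with lastch), eliminating A's prev buffer, first flag and leaked loop variable; note B is not lazy (it consumes the whole iterator up front), identical output on finite sequences.
import Mathlib
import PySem

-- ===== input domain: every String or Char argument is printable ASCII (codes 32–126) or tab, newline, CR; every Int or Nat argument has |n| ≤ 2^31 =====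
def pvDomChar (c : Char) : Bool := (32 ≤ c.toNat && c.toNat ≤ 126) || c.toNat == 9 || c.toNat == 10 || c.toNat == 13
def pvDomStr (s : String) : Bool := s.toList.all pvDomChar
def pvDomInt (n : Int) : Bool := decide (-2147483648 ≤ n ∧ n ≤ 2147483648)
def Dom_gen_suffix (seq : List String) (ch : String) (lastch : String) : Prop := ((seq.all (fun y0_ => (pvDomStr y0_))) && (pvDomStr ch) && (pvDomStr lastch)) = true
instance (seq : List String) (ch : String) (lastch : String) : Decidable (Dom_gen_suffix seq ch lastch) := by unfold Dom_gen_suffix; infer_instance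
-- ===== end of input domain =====

-- B materializes the sequence and emits two staged slice passes; the Pythons are
-- generators, so equivalence is about the produced sequence of items (B is not lazy).

-- ===== PORT A =====
-- loop state: (yielded output, prev, first); after the loop, `item` holds the last
-- element assigned, which equals prev, so the final yield uses prev.
def gen_suffix (seq : List String) (ch : String) (lastch : String) : List String :=
  let st := seq.foldl
    (fun (st : List String × Option String × Bool) item =>
      let (out, prev, first) := st
      if first then (out, some item, false)
      else (out ++ [prev.getD "" ++ ch], some item, false))
    ([], none, true)
  if st.2.2 then st.1 else st.1 ++ [st.2.1.getD "" ++ lastch]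

-- ===== PORT B =====
-- lst[:-1] and lst[-1:] are PySem.List.slice; the two for-yield passes are two maps.
def gen_suffix_alt (seq : List String) (ch : String) (lastch : String) : List String :=
  (PySem.List.slice seq none (some (-1))).map (fun s => s ++ ch)
    ++ (PySem.List.slice seq (some (-1)) none).map (fun s => s ++ lastch)

-- ===== PRECONDITION & SPEC =====
def Spec_gen_suffix (seq : List String) (ch : String) (lastch : String) (out : List String) : Prop := out = gen_suffix_alt seq ch lastch
instance (seq : List String) (ch : String) (lastch : String) (out : List String) : Decidable (Spec_gen_suffix seq ch lastch out) := by unfold Spec_gen_suffix; infer_instance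

-- ===== CLAIM (what is proved, stated in full; the proofs are below) =====
def Claim_equal_gen_suffix : Prop := ∀ (seq : List String) (ch : String) (lastch : String), Dom_gen_suffix seq ch lastch → Spec_gen_suffix seq ch lastch (gen_suffix seq ch lastch)

-- ===== LEMMAS AND PROOFS =====
-- A's loop, once the first element is consumed: yields prev+ch for each remaining
-- item and finally prev+lastch, i.e. maps ch over the non-last and lastch over the last.
theorem genSuffix_loop_eq (xs : List String) (prev : String) (out : List String)
    (ch lastch : String) :
    (let st := xs.foldl
        (fun (st : List String × Option String × Bool) item =>
          let (o, p, first) := st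
          if first then (o, some item, false)
          else (o ++ [p.getD "" ++ ch], some item, false))
        (out, some prev, false)
     if st.2.2 then st.1 else st.1 ++ [st.2.1.getD "" ++ lastch])
      = out ++ (prev :: xs).dropLast.map (fun s => s ++ ch)
            ++ ((prev :: xs).drop xs.length).map (fun s => s ++ lastch) := by
  induction xs generalizing prev out with
  | nil => simp
  | cons y ys ih =>
      simp only [List.foldl]
      rw [show (if (false : Bool) = true then (out, some y, false)
            else (out ++ [(some prev).getD "" ++ ch], some y, false))
          = (out ++ [prev ++ ch], some y, false) by simp]
      rw [ih y (out ++ [prev ++ ch])]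
      simp

-- ===== VERDICT (by name: the statement is the Claim_ definition above) =====
theorem gen_suffix_spec : Claim_equal_gen_suffix := by
  intro seq ch lastch _
  unfold Spec_gen_suffix gen_suffix gen_suffix_alt
  rw [PySem.List.slice_to_neg_one, PySem.List.slice_from_neg_one]
  cases seq with
  | nil => simp
  | cons x xs =>
      have := genSuffix_loop_eq xs x [] ch lastch
      simpa using this
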